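-- pv_equiv track=rewrite | github.com/Nitheesh-Parkala/Python-Program-Solving | DAY-27/Palindromic Programs.py | countContinuousPalindromes
-- ===== SOURCE A (Python) =====
-- def filtration(s1):
--     nstr = ""
--
--     for i in range(len(s1)):
--         if "A" <= s1[i] <= "Z":
--             nstr += chr(ord(s1[i])+32)
--         elif "a" <= s1[i] <= "z" or "0" <= s1[i] <= "9":
--             nstr += s1[i]
--     return nstr
--
-- def checkPalindrome(s1):
--     s1 = filtration(s1)
--     i, j = 0, len(s1)-1
--
--     while i <= j:
--         if s1[i] != s1[j]:
--             return False
--         i += 1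
--         j -= 1
--     return True
--
-- def countContinuousPalindromes(s1):
--     nwrd = ""
--     count = 0
--     max_val = []
--
--     for i in range(len(s1)):
--         if s1[i] != " ":
--             nwrd += s1[i]
--         else:
--             flag = checkPalindrome(nwrd)
--             if flag:
--                 count += 1
--             else:
--                 count = 0
--             nwrd = ""
--             if count > 0:
--                 max_val.append(count)
--
--     val = -2147483648
--     for i in max_val:
--         if val < i:
--             val = i
--     return val
-- ===== SOURCE B (Python) =====
-- def countContinuousPalindromes(s1):
--     # Boundary-gap method: find positions of NON-palindrome words, then the longest
--     # palindrome run is the largest gap between consecutive failure boundaries.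
--     words = s1.split(" ")[:-1]
--
--     def pal(w):
--         f = "".join(c.lower() for c in w if c.isalnum())
--         return f == f[::-1]
--
--     bounds = [-1] + [i for i, w in enumerate(words) if not pal(w)] + [len(words)]
--     best = max(b - a - 1 for a, b in zip(bounds, bounds[1:]))
--     return best if best > 0 else -2147483648
-- ===== Notes on version B (the rewrite author's own statement) =====
-- stated objective: alternative
-- what changed: A scans characters one by one, growing each word and its normalized form by repeated string concatenation, keeps a run counter plus a list of run lengths and finishes with a max pass; B instead splits once on spaces, records the indices of the NON-palindrome words (plus virtual boundaries -1 and len(words)), and returns the largest gap between consecutive boundary indices minus one, testing each word by comparing its filtered lowercase form with its reverse.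
import Mathlib
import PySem

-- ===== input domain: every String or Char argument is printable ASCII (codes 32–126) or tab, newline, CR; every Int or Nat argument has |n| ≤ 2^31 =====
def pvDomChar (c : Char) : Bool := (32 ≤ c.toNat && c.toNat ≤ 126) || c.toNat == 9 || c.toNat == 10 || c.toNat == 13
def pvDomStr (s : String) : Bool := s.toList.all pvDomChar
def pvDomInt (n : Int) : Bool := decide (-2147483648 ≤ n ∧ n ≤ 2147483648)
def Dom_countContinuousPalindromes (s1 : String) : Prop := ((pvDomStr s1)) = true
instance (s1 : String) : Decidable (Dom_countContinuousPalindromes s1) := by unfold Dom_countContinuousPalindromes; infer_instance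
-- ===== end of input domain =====

-- B replaces A's run-counter state machine by a boundary-gap method: it enumerates the
-- positions of NON-palindrome words and takes the largest gap between consecutive
-- failure boundaries (objective: alternative algorithm, same cost).


-- ===== PORT A =====
def pvFiltration (s : List Char) : List Char :=
  s.foldl (fun nstr c =>
    if 'A' ≤ c ∧ c ≤ 'Z' then nstr ++ [Char.ofNat (c.toNat + 32)]
    else if ('a' ≤ c ∧ c ≤ 'z') ∨ ('0' ≤ c ∧ c ≤ '9') then nstr ++ [c]
    else nstr) []

def pvPalLoop (s : List Char) (i j : Int) : Bool :=
  if i ≤ j then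
    if PySem.List.pyGet? s i ≠ PySem.List.pyGet? s j then false
    else pvPalLoop s (i + 1) (j - 1)
  else true
termination_by (j - i + 1).toNat
decreasing_by omega

def pvCheckPalindrome (s : List Char) : Bool :=
  let t := pvFiltration s
  pvPalLoop t 0 ((t.length : Int) - 1)

def countContinuousPalindromes (s1 : String) : Int :=
  let st := s1.toList.foldl (fun (st : List Char × Int × List Int) c =>
    if c ≠ ' ' then (st.1 ++ [c], st.2.1, st.2.2)
    else
      let count := if pvCheckPalindrome st.1 then st.2.1 + 1 else (0 : Int)
      (([] : List Char), count, if count > 0 then st.2.2 ++ [count] else st.2.2))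
    ([], 0, [])
  st.2.2.foldl (fun val i => if val < i then i else val) (-2147483648)

-- ===== PORT B =====
def pvIsPalB (w : List Char) : Bool :=
  let f := (w.filter PySem.Chars.isalnum).map PySem.Chars.lowerChar
  f == f.reverse  -- f[::-1] is the reversal

def countContinuousPalindromes_alt (s1 : String) : Int :=
  let words := (PySem.Chars.splitOn s1.toList [' ']).dropLast  -- split(" ")[:-1]
  let bounds : List Int := [-1] ++
    ((PySem.List.enumerate words 0).filterMap
      (fun p => if pvIsPalB p.2 then none else some p.1)) ++
    [(words.length : Int)]
  let diffs := (bounds.zip (bounds.drop 1)).map (fun p => p.2 - p.1 - 1)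
  -- Python's max over a generator; diffs is provably nonempty (bounds has ≥ 2 elements),
  -- so the .getD default is never used.
  let best := (PySem.List.max? diffs (fun x => x)).getD 0
  if best > 0 then best else -2147483648

-- ===== PRECONDITION & SPEC =====
def Spec_countContinuousPalindromes (s1 : String) (out : Int) : Prop := out = countContinuousPalindromes_alt s1
instance (s1 : String) (out : Int) : Decidable (Spec_countContinuousPalindromes s1 out) := by unfold Spec_countContinuousPalindromes; infer_instance

-- ===== CLAIM (what is proved, stated in full; the proofs are below) =====
def Claim_equal_countContinuousPalindromes : Prop := ∀ (s1 : String), Dom_countContinuousPalindromes s1 → Spec_countContinuousPalindromes s1 (countContinuousPalindromes s1)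

-- ===== LEMMAS AND PROOFS =====

theorem pvUpperFalse (c : Char) (h : ¬('A' ≤ c ∧ c ≤ 'Z')) : PySem.Chars.isupper c = false := by
  simp only [PySem.Chars.isupper, Bool.and_eq_false_iff, decide_eq_false_iff_not]
  by_contra hc
  push Not at hc
  exact h ⟨hc.1, hc.2⟩

-- A's filtration is filter-alnum-then-lowercase (B's normalization).
theorem pvFiltration_go (s : List Char) (acc : List Char) :
    s.foldl (fun nstr c =>
      if 'A' ≤ c ∧ c ≤ 'Z' then nstr ++ [Char.ofNat (c.toNat + 32)]
      else if ('a' ≤ c ∧ c ≤ 'z') ∨ ('0' ≤ c ∧ c ≤ '9') then nstr ++ [c]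
      else nstr) acc
    = acc ++ (s.filter PySem.Chars.isalnum).map PySem.Chars.lowerChar := by
  induction s generalizing acc with
  | nil => simp
  | cons c rest ih =>
    simp only [List.foldl_cons, List.filter_cons]
    by_cases h1 : 'A' ≤ c ∧ c ≤ 'Z'
    · have ha : PySem.Chars.isalnum c = true := by
        simp only [PySem.Chars.isalnum, PySem.Chars.isalpha, PySem.Chars.isupper,
          Bool.or_eq_true, Bool.and_eq_true, decide_eq_true_eq]
        exact Or.inl (Or.inl ⟨h1.1, h1.2⟩)
      have hl : PySem.Chars.lowerChar c = Char.ofNat (c.toNat + 32) := by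
        simp [PySem.Chars.lowerChar, PySem.Chars.isupper, h1.1, h1.2]
      rw [if_pos h1, ih, ha]
      simp [hl]
    · have hu := pvUpperFalse c h1
      by_cases h2 : ('a' ≤ c ∧ c ≤ 'z') ∨ ('0' ≤ c ∧ c ≤ '9')
      · have ha : PySem.Chars.isalnum c = true := by
          simp only [PySem.Chars.isalnum, PySem.Chars.isalpha, PySem.Chars.islower,
            PySem.Chars.isdigit, Bool.or_eq_true, Bool.and_eq_true, decide_eq_true_eq]
          rcases h2 with h | h
          · exact Or.inl (Or.inr ⟨h.1, h.2⟩)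
          · exact Or.inr ⟨h.1, h.2⟩
        have hl : PySem.Chars.lowerChar c = c := by
          simp [PySem.Chars.lowerChar, hu]
        rw [if_neg h1, if_pos h2, ih, ha]
        simp [hl]
      · have ha : PySem.Chars.isalnum c = false := by
          push Not at h2
          simp only [PySem.Chars.isalnum, PySem.Chars.isalpha, PySem.Chars.islower,
            PySem.Chars.isdigit, hu, Bool.or_eq_false_iff, Bool.and_eq_false_iff,
            decide_eq_false_iff_not]
          constructor
          · constructor
            · trivial
            · by_contra hc
              push Not at hc
              exact absurd (h2.1 hc.1) (not_lt.mpr hc.2)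
          · by_contra hc
            push Not at hc
            exact absurd (h2.2 hc.1) (not_lt.mpr hc.2)
        rw [if_neg h1, if_neg h2, ih, ha]
        simp

theorem pvFiltration_eq (s : List Char) :
    pvFiltration s = (s.filter PySem.Chars.isalnum).map PySem.Chars.lowerChar := by
  rw [pvFiltration, pvFiltration_go]
  simp

-- Two-pointer loop ↔ pointwise palindrome condition.
theorem pvPalLoop_spec (n : Nat) (t : List Char) (i j : Int)
    (hij : i + j = (t.length : Int) - 1) (hi : 0 ≤ i) (hn : (j - i + 1).toNat = n) :
    pvPalLoop t i j = true ↔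
      ∀ k : Nat, i ≤ (k : Int) → (k : Int) ≤ j → t[k]? = t[t.length - 1 - k]? := by
  induction n using Nat.strong_induction_on generalizing i j with
  | _ n ih =>
  rw [pvPalLoop]
  by_cases h : i ≤ j
  · rw [if_pos h]
    have hilen : i.toNat < t.length := by omega
    have hjlen : j.toNat < t.length := by omega
    have hgi : PySem.List.pyGet? t i = t[i.toNat]? := by
      rw [← Int.toNat_of_nonneg hi, PySem.List.pyGet?_natCast]
      congr 1
    have hgj : PySem.List.pyGet? t j = t[j.toNat]? := by
      rw [← Int.toNat_of_nonneg (by omega : (0:Int) ≤ j), PySem.List.pyGet?_natCast]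
      congr 1
    by_cases hne : PySem.List.pyGet? t i ≠ PySem.List.pyGet? t j
    · rw [if_pos hne]
      simp only [Bool.false_eq_true, false_iff]
      intro hall
      have := hall i.toNat (by omega) (by omega)
      have hj' : t.length - 1 - i.toNat = j.toNat := by omega
      rw [hj'] at this
      exact hne (by rw [hgi, hgj, this])
    · rw [if_neg hne]
      push Not at hne
      have heq : t[i.toNat]? = t[j.toNat]? := by rw [← hgi, ← hgj, hne]
      rw [ih (j - 1 - (i + 1) + 1).toNat (by omega) (i + 1) (j - 1) (by omega) (by omega) rfl]
      constructor
      · intro hinner k hk1 hk2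
        have hcase : (k : Int) = i ∨ (k : Int) = j ∨ (i + 1 ≤ (k : Int) ∧ (k : Int) ≤ j - 1) := by
          omega
        rcases hcase with hk | hk | hk
        · have hki : k = i.toNat := by omega
          subst hki
          have hj' : t.length - 1 - i.toNat = j.toNat := by omega
          rw [hj', heq]
        · have hkj : k = j.toNat := by omega
          subst hkj
          have hi' : t.length - 1 - j.toNat = i.toNat := by omega
          rw [hi', heq]
        · exact hinner k hk.1 hk.2
      · intro hall k hk1 hk2
        exact hall k (by omega) (by omega)
  · rw [if_neg h]
    simp only [true_iff]
    intro k hk1 hk2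
    omega

theorem pvPalLoop_eq_reverse (f : List Char) :
    pvPalLoop f 0 ((f.length : Int) - 1) = (f == f.reverse) := by
  rw [Bool.eq_iff_iff,
    pvPalLoop_spec (((f.length : Int) - 1) - 0 + 1).toNat f 0 ((f.length : Int) - 1)
      (by omega) le_rfl rfl, beq_iff_eq]
  constructor
  · intro hall
    apply List.ext_getElem?
    intro k
    by_cases hk : k < f.length
    · rw [List.getElem?_reverse hk]
      exact hall k (by omega) (by omega)
    · rw [List.getElem?_eq_none (by omega), List.getElem?_eq_none (by simpa using by omega)]
  · intro heq k hk1 hk2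
    have hk : k < f.length := by omega
    calc f[k]? = f.reverse[k]? := by rw [← heq]
    _ = f[f.length - 1 - k]? := List.getElem?_reverse hk

theorem pvCheck_eq_isPalB (w : List Char) : pvCheckPalindrome w = pvIsPalB w := by
  unfold pvCheckPalindrome pvIsPalB
  rw [pvFiltration_eq]
  exact pvPalLoop_eq_reverse _

-- Structural version of PySem.Chars.splitOn for a single-space separator.
def pvWSplit : List Char → List Char → List (List Char)
  | [], cur => [cur.reverse]
  | c :: rest, cur => if c = ' ' then cur.reverse :: pvWSplit rest [] else pvWSplit rest (c :: cur)

theorem pvWSplit_ne_nil (l cur : List Char) : pvWSplit l cur ≠ [] := by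
  cases l with
  | nil => simp [pvWSplit]
  | cons c rest =>
    simp only [pvWSplit]
    split
    · simp
    · exact pvWSplit_ne_nil rest (c :: cur)

theorem pvSplitOn_go_eq (fuel : Nat) (l cur : List Char) (acc : List (List Char))
    (h : l.length < fuel) :
    PySem.Chars.splitOn.go [' '] fuel l cur acc = acc.reverse ++ pvWSplit l cur := by
  induction fuel generalizing l cur acc with
  | zero => omega
  | succ fuel ih =>
    cases l with
    | nil => simp [PySem.Chars.splitOn.go, pvWSplit]
    | cons c rest =>
      rw [PySem.Chars.splitOn.go]
      by_cases hc : c = ' '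
      · subst hc
        have hp : [' '].isPrefixOf (' ' :: rest) = true := by simp [List.isPrefixOf]
        rw [if_pos hp]
        simp only [List.length_cons] at h
        rw [ih _ _ _ (by simpa using Nat.lt_of_succ_lt_succ h)]
        simp [pvWSplit]
      · have hp : [' '].isPrefixOf (c :: rest) = false := by
          simp [List.isPrefixOf]
          exact fun hh => absurd hh.symm hc
        rw [if_neg (by simp [hp])]
        simp only [List.length_cons] at h
        rw [ih _ _ _ (Nat.lt_of_succ_lt_succ h)]
        simp [pvWSplit, hc]

theorem pvSplitOn_eq (s : List Char) : PySem.Chars.splitOn s [' '] = pvWSplit s [] := by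
  rw [PySem.Chars.splitOn, pvSplitOn_go_eq (s.length + 1) s [] [] (Nat.lt_succ_self _)]
  simp

-- ---- proof-side helpers: A's word-level run scan and its characterizations ----

-- best run scored by A's scan, given a running count c (proof helper).
def pvT (c : Int) : List Bool → Int
  | [] => 0
  | b :: bs => if b then max (c + 1) (pvT (c + 1) bs) else pvT 0 bs

-- lengths of the (possibly empty) palindrome segments delimited by failures.
def pvSegs : List Bool → List Int
  | [] => [0]
  | true :: bs => match pvSegs bs with
    | [] => [1]
    | d :: r => (d + 1) :: r
  | false :: bs => 0 :: pvSegs bs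

def pvM (c : Int) (bs : List Bool) : Int :=
  match pvSegs bs with
  | [] => c
  | d :: r => r.foldl max (c + d)

theorem pvSegs_ne_nil (bs : List Bool) : pvSegs bs ≠ [] := by
  cases bs with
  | nil => simp [pvSegs]
  | cons b bs =>
    cases b
    · simp [pvSegs]
    · simp only [pvSegs]
      cases pvSegs bs <;> simp

-- The main bridge: A's character loop followed by the max pass is the run scan over words.
theorem pvBridge (l : List Char) (nwrd : List Char) (count : Int) (mv : List Int) (best : Int)
    (hc : 0 ≤ count) (hb : 0 ≤ best)
    (hmax : mv.foldl (fun val i => if val < i then i else val) (-2147483648)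
            = if 0 < best then best else -2147483648) :
    ((l.foldl (fun (st : List Char × Int × List Int) c =>
        if c ≠ ' ' then (st.1 ++ [c], st.2.1, st.2.2)
        else
          let count := if pvCheckPalindrome st.1 then st.2.1 + 1 else (0 : Int)
          (([] : List Char), count, if count > 0 then st.2.2 ++ [count] else st.2.2))
      (nwrd, count, mv)).2.2).foldl (fun val i => if val < i then i else val) (-2147483648)
    = (if 0 < (((pvWSplit l nwrd.reverse).dropLast).foldl (fun (st : Int × Int) w =>
        if pvIsPalB w then (st.1 + 1, if st.1 + 1 > st.2 then st.1 + 1 else st.2)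
        else ((0 : Int), st.2)) (count, best)).2
       then (((pvWSplit l nwrd.reverse).dropLast).foldl (fun (st : Int × Int) w =>
        if pvIsPalB w then (st.1 + 1, if st.1 + 1 > st.2 then st.1 + 1 else st.2)
        else ((0 : Int), st.2)) (count, best)).2
       else -2147483648) := by
  induction l generalizing nwrd count mv best with
  | nil =>
    simpa [pvWSplit] using hmax
  | cons c rest ih =>
    by_cases hsp : c = ' '
    · subst hsp
      have hw : pvWSplit (' ' :: rest) nwrd.reverse = nwrd :: pvWSplit rest [] := by
        simp [pvWSplit]
      rw [hw, List.dropLast_cons_of_ne_nil (pvWSplit_ne_nil rest []), List.foldl_cons,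
        List.foldl_cons]
      simp only [ne_eq, not_true_eq_false, if_false, pvCheck_eq_isPalB]
      by_cases hpal : pvIsPalB nwrd
      · rw [if_pos hpal, if_pos hpal]
        have hcount : (0 : Int) < count + 1 := by omega
        rw [if_pos hcount]
        have hmax' : (mv ++ [count + 1]).foldl (fun val i => if val < i then i else val) (-2147483648)
            = if 0 < (if count + 1 > best then count + 1 else best)
              then (if count + 1 > best then count + 1 else best) else -2147483648 := by
          rw [List.foldl_append, hmax]
          simp only [List.foldl_cons, List.foldl_nil]
          split_ifs <;> omega
        have := ih ([] : List Char) (count + 1) (mv ++ [count + 1])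
          (if count + 1 > best then count + 1 else best) (by omega)
          (by split_ifs <;> omega) hmax'
        simpa [pvCheck_eq_isPalB] using this
      · rw [if_neg hpal, if_neg hpal]
        simp only [gt_iff_lt, lt_self_iff_false, if_false]
        have := ih ([] : List Char) 0 mv best le_rfl hb hmax
        simpa [pvCheck_eq_isPalB] using this
    · have hw : pvWSplit (c :: rest) nwrd.reverse = pvWSplit rest ((nwrd ++ [c]).reverse) := by
        simp [pvWSplit, hsp]
      rw [List.foldl_cons]
      simp only [ne_eq, hsp, not_false_eq_true, if_true]
      rw [hw] at *
      exact ih (nwrd ++ [c]) count mv best hc hb hmax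

-- The run scan computes max best (pvT count flags).
theorem pvScanT (ws : List (List Char)) (c b : Int) (hb : 0 ≤ b) :
    (ws.foldl (fun (st : Int × Int) w =>
        if pvIsPalB w then (st.1 + 1, if st.1 + 1 > st.2 then st.1 + 1 else st.2)
        else ((0 : Int), st.2)) (c, b)).2
    = max b (pvT c (ws.map pvIsPalB)) := by
  induction ws generalizing c b with
  | nil => simp [pvT]; omega
  | cons w ws ih =>
    simp only [List.foldl_cons, List.map_cons, pvT]
    by_cases hp : pvIsPalB w
    · rw [if_pos hp, if_pos hp, ih (c + 1) _ (by split_ifs <;> omega)]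
      have := le_max_left b (pvT (c + 1) (ws.map pvIsPalB))
      split_ifs <;> omega
    · rw [if_neg hp, if_neg hp, ih 0 b hb]

theorem pvFoldlMaxInit (l : List Int) (a b : Int) :
    l.foldl max (max a b) = max a (l.foldl max b) := by
  induction l generalizing b with
  | nil => simp
  | cons x l ih =>
    simp only [List.foldl_cons, max_assoc]
    exact ih (max b x)

-- max c (pvT c bs) is the max of the segment lengths with c added to the first one.
theorem pvMaxT (bs : List Bool) (c : Int) (hc : 0 ≤ c) :
    max c (pvT c bs) = pvM c bs := by
  induction bs generalizing c with
  | nil => simp [pvT, pvM, pvSegs]; omega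
  | cons b bs ih =>
    cases b
    · -- failure: segment list gains a leading 0
      rcases h : pvSegs bs with _ | ⟨d, r⟩
      · exact absurd h (pvSegs_ne_nil bs)
      · have hM : pvM 0 bs = r.foldl max d := by simp [pvM, h]
        have hT := ih 0 le_rfl
        rw [hM] at hT
        simp only [pvT, pvM, pvSegs, h, if_neg Bool.false_ne_true, List.foldl_cons]
        have : max (c + 0) d = max c d := by omega
        rw [this, pvFoldlMaxInit, ← hT]
        omega
    · -- success: first segment grows by one
      rcases h : pvSegs bs with _ | ⟨d, r⟩
      · exact absurd h (pvSegs_ne_nil bs)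
      · have hT := ih (c + 1) (by omega)
        have hM : pvM (c + 1) bs = r.foldl max (c + 1 + d) := by simp [pvM, h]
        rw [hM] at hT
        simp only [pvT, pvM, pvSegs, h, reduceIte]
        have h1 : max c (max (c + 1) (pvT (c + 1) bs)) = max (c + 1) (pvT (c + 1) bs) := by omega
        have h2 : c + (d + 1) = c + 1 + d := by omega
        rw [h1, hT, h2]

def pvDiffsOf (l : List Int) : List Int :=
  (l.zip (l.drop 1)).map (fun p => p.2 - p.1 - 1)

theorem pvDiffsOf_cons_cons (a b : Int) (xs : List Int) :
    pvDiffsOf (a :: b :: xs) = (b - a - 1) :: pvDiffsOf (b :: xs) := by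
  simp [pvDiffsOf]

-- B's boundary differences are exactly the palindrome-segment lengths (first one shifted).
theorem pvDiffsEq (ws : List (List Char)) (s p d : Int) (r : List Int)
    (h : pvSegs (ws.map pvIsPalB) = d :: r) :
    pvDiffsOf (p :: ((PySem.List.enumerate ws s).filterMap
        (fun q => if pvIsPalB q.2 then none else some q.1)) ++ [s + (ws.length : Int)])
    = (s - 1 - p + d) :: r := by
  induction ws generalizing s p d r with
  | nil =>
    simp only [List.map_nil, pvSegs] at h
    injection h with h1 h2
    subst h1; subst h2
    simp [pvDiffsOf]
    omega
  | cons w ws ih =>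
    rw [PySem.List.enumerate_cons]
    by_cases hp : pvIsPalB w
    · -- palindrome word: index s is skipped
      simp only [List.map_cons, hp, pvSegs] at h
      rcases h' : pvSegs (ws.map pvIsPalB) with _ | ⟨d', r'⟩
      · exact absurd h' (pvSegs_ne_nil _)
      · rw [h'] at h
        injection h with h1 h2
        subst h1; subst h2
        simp only [List.filterMap_cons, hp, reduceIte]
        have hlen : s + (((w :: ws).length : Nat) : Int) = (s + 1) + (ws.length : Int) := by
          simp only [List.length_cons]
          push_cast
          omega
        rw [hlen, ih (s + 1) p d' r' h']
        congr 1
        omega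
    · -- non-palindrome word: index s is a boundary
      have hf : pvIsPalB w = false := by simpa using hp
      simp only [List.map_cons, hf, pvSegs] at h
      rcases h' : pvSegs (ws.map pvIsPalB) with _ | ⟨d', r'⟩
      · exact absurd h' (pvSegs_ne_nil _)
      · rw [h'] at h
        injection h with h1 h2
        subst h1; subst h2
        simp only [List.filterMap_cons, hf, Bool.false_eq_true, reduceIte]
        have hlen : s + (((w :: ws).length : Nat) : Int) = (s + 1) + (ws.length : Int) := by
          simp only [List.length_cons]
          push_cast
          omega
        rw [hlen]
        simp only [List.cons_append]
        rw [pvDiffsOf_cons_cons]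
        have h2 := ih (s + 1) s d' r' h'
        simp only [List.cons_append] at h2
        rw [h2]
        congr 1
        · omega
        · congr 1
          omega

-- ===== VERDICT (by name: the statement is the Claim_ definition above) =====
theorem countContinuousPalindromes_spec : Claim_equal_countContinuousPalindromes := by
  intro s1 _
  unfold Spec_countContinuousPalindromes countContinuousPalindromes countContinuousPalindromes_alt
  rw [pvSplitOn_eq]
  have hA := pvBridge s1.toList [] 0 [] 0 le_rfl le_rfl (by simp)
  simp only [List.reverse_nil] at hA
  rw [hA]
  rcases h : pvSegs (((pvWSplit s1.toList []).dropLast).map pvIsPalB) with _ | ⟨d, r⟩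
  · exact absurd h (pvSegs_ne_nil _)
  · have hscan := pvScanT ((pvWSplit s1.toList []).dropLast) 0 0 le_rfl
    have hmt := pvMaxT (((pvWSplit s1.toList []).dropLast).map pvIsPalB) 0 le_rfl
    have hM : pvM 0 (((pvWSplit s1.toList []).dropLast).map pvIsPalB) = r.foldl max d := by
      simp only [pvM, h]
      congr 1
      omega
    have hdiffs := pvDiffsEq ((pvWSplit s1.toList []).dropLast) 0 (-1) d r h
    simp only [pvDiffsOf] at hdiffs
    simp only [List.cons_append, List.nil_append] at hdiffs ⊢
    rw [show ((0 : Int) - 1 - (-1) + d) = d from by omega] at hdiffs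
    rw [show ((0 : Int) + ((((pvWSplit s1.toList []).dropLast).length : Nat) : Int))
        = ((((pvWSplit s1.toList []).dropLast).length : Nat) : Int) from by omega] at hdiffs
    rw [hdiffs, PySem.List.max?_id_cons d r]
    simp only [Option.getD_some]
    rw [hscan, hmt, hM]
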